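-- pv_equiv track=rewrite | github.com/talolard/SICKR | scripts/docker_deps/fetch_postgres_snapshot.py | _repo_name_from_remote_url
-- ===== SOURCE A (Python) =====
-- def _repo_name_from_remote_url(remote_url: str) -> str:
--     normalized = remote_url.strip().removesuffix(".git")
--     prefixes = (
--         "git@github.com:",
--         "ssh://git@github.com/",
--         "https://github.com/",
--         "http://github.com/",
--     )
--     for prefix in prefixes:
--         if normalized.startswith(prefix):
--             return normalized.removeprefix(prefix)
--     msg = f"Unsupported GitHub remote URL: {remote_url}"
--     raise ValueError(msg)
-- ===== SOURCE B (Python) =====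
-- _TABLE = {
--     ("git@", ":"),
--     ("ssh://git@", "/"),
--     ("https://", "/"),
--     ("http://", "/"),
-- }
--
--
-- def _repo_name_from_remote_url(remote_url: str) -> str:
--     normalized = remote_url.strip()
--     if normalized.endswith(".git"):
--         normalized = normalized[: -4]
--     head, found, tail = normalized.partition("github.com")
--     if found and (head, tail[:1]) in _TABLE:
--         return tail[1:]
--     msg = f"Unsupported GitHub remote URL: {remote_url}"
--     raise ValueError(msg)
-- ===== Notes on version B (the rewrite author's own statement) =====
-- stated objective: alternative
-- what changed: Replaces A's try-each-of-four-prefixes loop (startswith/removeprefix per prefix) by a single substring search (str.partition on 'github.com') followed by one table lookup of the (scheme, separator) pair.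
import Mathlib
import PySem

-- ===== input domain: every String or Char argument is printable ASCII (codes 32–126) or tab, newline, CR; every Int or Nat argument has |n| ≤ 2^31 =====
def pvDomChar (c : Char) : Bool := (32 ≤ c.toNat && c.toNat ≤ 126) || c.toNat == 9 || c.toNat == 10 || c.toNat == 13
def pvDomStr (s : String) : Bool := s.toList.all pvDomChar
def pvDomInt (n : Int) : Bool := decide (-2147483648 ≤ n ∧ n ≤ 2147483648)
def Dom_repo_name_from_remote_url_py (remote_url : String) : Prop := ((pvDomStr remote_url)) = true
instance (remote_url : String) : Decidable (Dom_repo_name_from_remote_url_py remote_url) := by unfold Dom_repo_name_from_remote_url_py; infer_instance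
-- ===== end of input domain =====

-- B replaces A's try-each-prefix loop by one substring search (str.partition on "github.com")
-- plus a table lookup on (scheme, separator); objective: idiomatic/alternative, same cost.
-- Both programs raise ValueError on unsupported URLs; those inputs are outside Pre_.

-- ===== PORT A =====
-- normalized = remote_url.strip().removesuffix(".git")  (removesuffix ported by hand:
-- drop the last 4 chars iff the string ends with ".git"; exact)
def pvNormA (l : List Char) : List Char :=
  let s := PySem.Chars.strip l
  if PySem.Chars.endswith s ".git".toList then s.take (s.length - 4) else s

-- the for-loop over the four prefixes, unrolled in order; removeprefix = drop (length prefix).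
-- On the raise path (ValueError) the port returns [] — excluded by Pre_.
def pvAcore (n : List Char) : List Char :=
  if PySem.Chars.startswith n "git@github.com:".toList then n.drop 15
  else if PySem.Chars.startswith n "ssh://git@github.com/".toList then n.drop 21
  else if PySem.Chars.startswith n "https://github.com/".toList then n.drop 19
  else if PySem.Chars.startswith n "http://github.com/".toList then n.drop 18
  else []

def repo_name_from_remote_url_py (remote_url : String) : String :=
  String.mk (pvAcore (pvNormA remote_url.toList))

-- ===== PORT B =====
-- same normalization as Source B (strip, then drop ".git" suffix if present)
def pvNormB (l : List Char) : List Char :=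
  let s := PySem.Chars.strip l
  if PySem.Chars.endswith s ".git".toList then s.take (s.length - 4) else s

-- str.partition("github.com"): first occurrence; returns (head, tail-after-needle), none if absent
def pvPart : List Char → Option (List Char × List Char)
  | [] => none
  | c :: rest =>
    match "github.com".toList.isPrefixOf (c :: rest) with
    | true => some ([], (c :: rest).drop 10)
    | false => (pvPart rest).map (fun p => (c :: p.1, p.2))

-- the table lookup (head, tail[:1]) in _TABLE, then return tail[1:];
-- raise path returns [] — excluded by Pre_.
def pvBcore (n : List Char) : List Char :=
  match pvPart n with
  | some (h, r) =>
    if (h == "git@".toList && r.take 1 == [':']) ||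
       (h == "ssh://git@".toList && r.take 1 == ['/']) ||
       (h == "https://".toList && r.take 1 == ['/']) ||
       (h == "http://".toList && r.take 1 == ['/']) then r.drop 1 else []
  | none => []

def repo_name_from_remote_url_py_alt (remote_url : String) : String :=
  String.mk (pvBcore (pvNormB remote_url.toList))

-- ===== PRECONDITION & SPEC =====
-- Pre_ excludes exactly the inputs on which A raises ValueError (the normalized string
-- starts with none of the four supported GitHub prefixes); B raises there too.
def Pre_repo_name_from_remote_url_py (remote_url : String) : Prop :=
  let s := PySem.Chars.strip remote_url.toList
  let n := if PySem.Chars.endswith s ".git".toList then s.take (s.length - 4) else s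
  (PySem.Chars.startswith n "git@github.com:".toList ||
   PySem.Chars.startswith n "ssh://git@github.com/".toList ||
   PySem.Chars.startswith n "https://github.com/".toList ||
   PySem.Chars.startswith n "http://github.com/".toList) = true
instance (remote_url : String) : Decidable (Pre_repo_name_from_remote_url_py remote_url) := by unfold Pre_repo_name_from_remote_url_py; infer_instance

def pvWitness_repo_name_from_remote_url_py : String := "git@github.com:talolard/SICKR.git"

def Spec_repo_name_from_remote_url_py (remote_url : String) (out : String) : Prop := out = repo_name_from_remote_url_py_alt remote_url
instance (remote_url : String) (out : String) : Decidable (Spec_repo_name_from_remote_url_py remote_url out) := by unfold Spec_repo_name_from_remote_url_py; infer_instance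

-- ===== CLAIM (what is proved, stated in full; the proofs are below) =====
def Claim_equal_repo_name_from_remote_url_py : Prop := ∀ (remote_url : String), Dom_repo_name_from_remote_url_py remote_url → Pre_repo_name_from_remote_url_py remote_url → Spec_repo_name_from_remote_url_py remote_url (repo_name_from_remote_url_py remote_url)

-- ===== LEMMAS AND PROOFS =====

theorem pvPart_sound (l h r : List Char) (hp : pvPart l = some (h, r)) :
    l = h ++ "github.com".toList ++ r := by
  induction l generalizing h r with
  | nil => simp [pvPart] at hp
  | cons c rest ih =>
    cases hpre : "github.com".toList.isPrefixOf (c :: rest) with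
    | true =>
      rw [pvPart, hpre] at hp
      simp at hp
      obtain ⟨hh, hr⟩ := hp
      obtain ⟨t, ht⟩ := List.isPrefixOf_iff_prefix.mp hpre
      subst hh
      simp only [List.nil_append]
      have ht10 : t = List.drop 9 rest := by
        have h2 := congrArg (List.drop 10) ht
        simpa using h2
      rw [← ht, ht10, hr]
    | false =>
      rw [pvPart, hpre] at hp
      simp at hp
      obtain ⟨h', hp', rfl⟩ := hp
      simpa using ih h' r hp'

theorem pvSwFalse {n p : List Char} (h : ¬ p <+: n) : PySem.Chars.startswith n p = false := by
  rw [Bool.eq_false_iff]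
  exact fun hh => h ((PySem.Chars.startswith_iff _ _).mp hh)

theorem pvPart1 (rest : List Char) :
    pvPart ("git@github.com:".toList ++ rest) = some ("git@".toList, ':' :: rest) := by
  simp [pvPart, List.isPrefixOf]

theorem pvPart2 (rest : List Char) :
    pvPart ("ssh://git@github.com/".toList ++ rest) = some ("ssh://git@".toList, '/' :: rest) := by
  simp [pvPart, List.isPrefixOf]

theorem pvPart3 (rest : List Char) :
    pvPart ("https://github.com/".toList ++ rest) = some ("https://".toList, '/' :: rest) := by
  simp [pvPart, List.isPrefixOf]

theorem pvPart4 (rest : List Char) :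
    pvPart ("http://github.com/".toList ++ rest) = some ("http://".toList, '/' :: rest) := by
  simp [pvPart, List.isPrefixOf]

theorem pvCore_eq (n : List Char) : pvAcore n = pvBcore n := by
  by_cases h1 : "git@github.com:".toList <+: n
  · obtain ⟨rest, rfl⟩ := h1
    have hs : PySem.Chars.startswith ("git@github.com:".toList ++ rest) "git@github.com:".toList = true :=
      (PySem.Chars.startswith_iff _ _).mpr (List.prefix_append _ _)
    simp only [pvAcore, pvBcore]
    rw [hs, pvPart1]
    simp
  · by_cases h2 : "ssh://git@github.com/".toList <+: n
    · obtain ⟨rest, rfl⟩ := h2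
      have hs : PySem.Chars.startswith ("ssh://git@github.com/".toList ++ rest) "ssh://git@github.com/".toList = true :=
        (PySem.Chars.startswith_iff _ _).mpr (List.prefix_append _ _)
      simp only [pvAcore, pvBcore]
      rw [pvSwFalse h1, hs, pvPart2]
      simp
    · by_cases h3 : "https://github.com/".toList <+: n
      · obtain ⟨rest, rfl⟩ := h3
        have hs : PySem.Chars.startswith ("https://github.com/".toList ++ rest) "https://github.com/".toList = true :=
          (PySem.Chars.startswith_iff _ _).mpr (List.prefix_append _ _)
        simp only [pvAcore, pvBcore]
        rw [pvSwFalse h1, pvSwFalse h2, hs, pvPart3]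
        simp
      · by_cases h4 : "http://github.com/".toList <+: n
        · obtain ⟨rest, rfl⟩ := h4
          have hs : PySem.Chars.startswith ("http://github.com/".toList ++ rest) "http://github.com/".toList = true :=
            (PySem.Chars.startswith_iff _ _).mpr (List.prefix_append _ _)
          simp only [pvAcore, pvBcore]
          rw [pvSwFalse h1, pvSwFalse h2, pvSwFalse h3, hs, pvPart4]
          simp
        · have hA : pvAcore n = [] := by
            simp only [pvAcore]
            rw [pvSwFalse h1, pvSwFalse h2, pvSwFalse h3, pvSwFalse h4]
            simp
          rcases hp : pvPart n with _ | ⟨h, r⟩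
          · simp [pvBcore, hp, hA]
          · have hn := pvPart_sound n h r hp
            have htake : ∀ (a : Char), List.take 1 r = [a] → ∃ r', r = a :: r' := by
              intro a ha
              cases r with
              | nil => simp at ha
              | cons b t =>
                simp at ha
                exact ⟨t, by rw [ha]⟩
            rw [hA]
            simp only [pvBcore, hp]
            split
            · rename_i hcond
              exfalso
              simp only [Bool.or_eq_true, Bool.and_eq_true, beq_iff_eq] at hcond
              rcases hcond with ((hc1 | hc2) | hc3) | hc4
              · obtain ⟨rfl, ht⟩ := hc1
                obtain ⟨r', rfl⟩ := htake ':' ht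
                exact h1 ⟨r', by simp [hn]⟩
              · obtain ⟨rfl, ht⟩ := hc2
                obtain ⟨r', rfl⟩ := htake '/' ht
                exact h2 ⟨r', by simp [hn]⟩
              · obtain ⟨rfl, ht⟩ := hc3
                obtain ⟨r', rfl⟩ := htake '/' ht
                exact h3 ⟨r', by simp [hn]⟩
              · obtain ⟨rfl, ht⟩ := hc4
                obtain ⟨r', rfl⟩ := htake '/' ht
                exact h4 ⟨r', by simp [hn]⟩
            · rfl

-- ===== VERDICT (by name: the statement is the Claim_ definition above) =====
theorem repo_name_from_remote_url_py_spec : Claim_equal_repo_name_from_remote_url_py := by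
  intro r _ _
  unfold Spec_repo_name_from_remote_url_py repo_name_from_remote_url_py repo_name_from_remote_url_py_alt pvNormA pvNormB
  rw [pvCore_eq]
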